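-- pv_equiv track=rewrite | github.com/natefoo/misc-scripts | tool-testing/tester.py | find_tool_in_list
-- ===== SOURCE A (Python) =====
-- def find_tool_in_list(tools, tool_id, versionless=None):
--     index = None
--     for i, tool_dict in enumerate(tools):
--         if tool_dict['id'] == tool_id:
--             return (i, True)
--         elif versionless and tool_dict['id'].startswith(versionless + '/'):
--             # same tool, different version
--             index = i
--     else:
--         return (index, False)
-- ===== SOURCE B (Python) =====
-- def find_tool_in_list(tools, tool_id, versionless=None):
--     # Pass 1: exact id match wins immediately.
--     for i, tool_dict in enumerate(tools):
--         if tool_dict['id'] == tool_id: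
--             return (i, True)
--     # Pass 2 (only if versionless is truthy): last versionless-prefix match.
--     index = None
--     if versionless:
--         prefix = versionless + '/'
--         for i, tool_dict in enumerate(tools):
--             if tool_dict['id'].startswith(prefix):
--                 index = i
--     return (index, False)
-- ===== Notes on version B (the rewrite author's own statement) =====
-- stated objective: alternative
-- what changed: Replaces A's single for/else scan with interleaved state (early return on exact match, running last-prefix index otherwise) by two separate passes: a first pass that only looks for the exact id, and a second pass, guarded by versionless, that records the last prefix match.
import Mathlib
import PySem

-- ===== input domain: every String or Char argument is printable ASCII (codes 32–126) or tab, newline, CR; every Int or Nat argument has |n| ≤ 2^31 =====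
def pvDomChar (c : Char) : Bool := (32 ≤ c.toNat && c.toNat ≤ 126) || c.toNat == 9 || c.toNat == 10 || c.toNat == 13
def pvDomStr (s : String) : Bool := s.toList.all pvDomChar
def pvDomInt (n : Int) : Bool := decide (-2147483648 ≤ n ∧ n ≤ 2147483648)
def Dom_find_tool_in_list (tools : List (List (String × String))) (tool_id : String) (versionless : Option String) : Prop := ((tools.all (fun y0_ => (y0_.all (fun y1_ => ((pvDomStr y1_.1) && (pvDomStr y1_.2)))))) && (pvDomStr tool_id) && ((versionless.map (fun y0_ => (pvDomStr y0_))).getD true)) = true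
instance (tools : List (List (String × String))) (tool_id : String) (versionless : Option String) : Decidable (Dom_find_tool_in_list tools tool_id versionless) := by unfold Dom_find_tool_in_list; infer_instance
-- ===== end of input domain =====

-- ===== PORT A =====
-- B is an alternative decomposition of A's single scan into two separate passes; same cost.
-- tool_dict['id'] : first-match association-list lookup (dict convention)
def pvGetId (d : List (String × String)) : Option String :=
  List.lookup "id" d

def pvTruthy (v : Option String) : Bool :=
  match v with
  | none => false
  | some s => s ≠ ""

-- A's single loop: early return on exact match, else keep last pfx index.
def pvLoopA (tool_id : String) (versionless : Option String)
    (tools : List (List (String × String))) (i : Int) (index : Option Int) : Option Int × Bool :=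
  match tools with
  | [] => (index, false)
  | d :: rest =>
    let id := (pvGetId d).getD ""   -- lookup succeeds under Pre_
    if id == tool_id then (some i, true)
    else if pvTruthy versionless &&
            PySem.Str.startswith id ((versionless.getD "") ++ "/") then
      pvLoopA tool_id versionless rest (i + 1) (some i)
    else
      pvLoopA tool_id versionless rest (i + 1) index

def find_tool_in_list (tools : List (List (String × String))) (tool_id : String) (versionless : Option String) : Option Int × Bool :=
  pvLoopA tool_id versionless tools 0 none

-- ===== PORT B =====
-- pass 1: first index with exact id match
def pvPass1 (tool_id : String) (tools : List (List (String × String))) (i : Int) : Option Int :=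
  match tools with
  | [] => none
  | d :: rest =>
    if (pvGetId d).getD "" == tool_id then some i
    else pvPass1 tool_id rest (i + 1)

-- pass 2: last index whose id starts with the pfx
def pvPass2 (pfx : String) (tools : List (List (String × String))) (i : Int) (index : Option Int) : Option Int :=
  match tools with
  | [] => index
  | d :: rest =>
    pvPass2 pfx rest (i + 1)
      (if PySem.Str.startswith ((pvGetId d).getD "") pfx then some i else index)

def find_tool_in_list_alt (tools : List (List (String × String))) (tool_id : String) (versionless : Option String) : Option Int × Bool :=
  match pvPass1 tool_id tools 0 with
  | some j => (some j, true)
  | none =>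
    if pvTruthy versionless then
      (pvPass2 ((versionless.getD "") ++ "/") tools 0 none, false)
    else (none, false)

-- ===== PRECONDITION & SPEC =====
-- Pre_ excludes exactly the inputs where A raises KeyError: a dict without an 'id' key is
-- reached by the scan, i.e. some dict lacks 'id' and no earlier dict is an exact id match.
def Pre_find_tool_in_list (tools : List (List (String × String))) (tool_id : String) (_versionless : Option String) : Prop :=
  ∀ i < tools.length, (List.lookup "id" (tools.getD i [])).isSome = false →
    ∃ j < i, List.lookup "id" (tools.getD j []) = some tool_id
instance (tools : List (List (String × String))) (tool_id : String) (versionless : Option String) : Decidable (Pre_find_tool_in_list tools tool_id versionless) := by unfold Pre_find_tool_in_list; infer_instance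

def pvWitness_find_tool_in_list : (List (List (String × String))) × String × Option String :=
  ([[("id", "samtools/1.9")], [("id", "bwa/0.7")]], "bwa/0.7", some "samtools")

def Spec_find_tool_in_list (tools : List (List (String × String))) (tool_id : String) (versionless : Option String) (out : Option Int × Bool) : Prop := out = find_tool_in_list_alt tools tool_id versionless
instance (tools : List (List (String × String))) (tool_id : String) (versionless : Option String) (out : Option Int × Bool) : Decidable (Spec_find_tool_in_list tools tool_id versionless out) := by unfold Spec_find_tool_in_list; infer_instance

-- ===== CLAIM =====
def Claim_equal_find_tool_in_list : Prop := ∀ (tools : List (List (String × String))) (tool_id : String) (versionless : Option String), Dom_find_tool_in_list tools tool_id versionless → Pre_find_tool_in_list tools tool_id versionless → Spec_find_tool_in_list tools tool_id versionless (find_tool_in_list tools tool_id versionless)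

-- ===== LEMMAS AND PROOFS =====
theorem pvLoop_eq (tool_id : String) (versionless : Option String)
    (tools : List (List (String × String))) (i : Int) (index : Option Int) :
    pvLoopA tool_id versionless tools i index =
      match pvPass1 tool_id tools i with
      | some j => (some j, true)
      | none =>
        if pvTruthy versionless then
          (pvPass2 ((versionless.getD "") ++ "/") tools i index, false)
        else (index, false) := by
  induction tools generalizing i index with
  | nil => simp [pvLoopA, pvPass1, pvPass2]
  | cons d rest ih =>
    by_cases h1 : ((pvGetId d).getD "" == tool_id) = true
    · simp [pvLoopA, pvPass1, h1]
    · by_cases h2 : pvTruthy versionless = true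
      · by_cases h3 : PySem.Chars.startswith ((pvGetId d).getD "").toList
            ((versionless.getD "").toList ++ ['/']) = true
        · simp [pvLoopA, pvPass1, pvPass2, h1, h2, h3, ih]
        · simp [pvLoopA, pvPass1, pvPass2, h1, h2, h3, ih]
      · simp [pvLoopA, pvPass1, h1, h2, ih]

-- ===== VERDICT =====
theorem find_tool_in_list_spec : Claim_equal_find_tool_in_list := by
  intro tools tool_id versionless _hdom _hpre
  unfold Spec_find_tool_in_list find_tool_in_list find_tool_in_list_alt
  exact pvLoop_eq tool_id versionless tools 0 none
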